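-- pv_equiv track=rewrite | github.com/pralinkhaira/gfg-soln | Difficulty: Medium/Maximum sum of elements not part of LIS/maximum-sum-of-elements-not-part-of-lis.py | nonLisMaxSum
-- ===== SOURCE A (Python) =====
-- from bisect import bisect_left
--
-- def nonLisMaxSum(arr):
--     # code here
--     n = len(arr)
--     parent = [-1] * n  # Stores the previous index in the LIS
--     dp = []            # Holds the indices of potential LIS
--     pos = [0] * n      # pos[i] = index of the LIS ending at i
--
--     for i in range(n):
--         # Find the location where arr[i] can be inserted in dp
--         idx = bisect_left([arr[j] for j in dp], arr[i])
--
--         if idx < len(dp):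
--             dp[idx] = i
--         else:
--             dp.append(i)
--
--         pos[i] = idx
--         if idx > 0:
--             parent[i] = dp[idx - 1]  # Link to previous element in LIS
--
--     # Now reconstruct LIS using parent array
--     lis_sum = 0
--     lis_len = len(dp)
--     k = -1
--
--     # Find the last index where LIS ends (has max pos value)
--     for i in range(n - 1, -1, -1):
--         if pos[i] == lis_len - 1:
--             k = i
--             break
--
--     while k != -1:
--         lis_sum += arr[k]
--         k = parent[k]
--
--     return sum(arr) - lis_sum
-- ===== SOURCE B (Python) =====
-- from bisect import bisect_left
--
-- def nonLisMaxSum(arr):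
--     # O(n log n): maintain the tails-value array directly (no per-step rebuild),
--     # and recover the LIS sum by one backward scan over pos instead of parent links.
--     tails = []
--     pos = []
--     for x in arr:
--         idx = bisect_left(tails, x)
--         if idx < len(tails):
--             tails[idx] = x
--         else:
--             tails.append(x)
--         pos.append(idx)
--     target = len(tails) - 1
--     lis_sum = 0
--     for i in range(len(arr) - 1, -1, -1):
--         if pos[i] == target:
--             lis_sum += arr[i]
--             target -= 1
--     return sum(arr) - lis_sum
-- ===== Notes on version B (the rewrite author's own statement) =====
-- stated objective: faster
-- what changed: B maintains the tails-value array in place (A rebuilds the list of dp-values for every bisect, making it quadratic) and recovers the LIS sum by a single backward scan over the pos array instead of A's parent-pointer array and chain walk.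
import Mathlib
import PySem

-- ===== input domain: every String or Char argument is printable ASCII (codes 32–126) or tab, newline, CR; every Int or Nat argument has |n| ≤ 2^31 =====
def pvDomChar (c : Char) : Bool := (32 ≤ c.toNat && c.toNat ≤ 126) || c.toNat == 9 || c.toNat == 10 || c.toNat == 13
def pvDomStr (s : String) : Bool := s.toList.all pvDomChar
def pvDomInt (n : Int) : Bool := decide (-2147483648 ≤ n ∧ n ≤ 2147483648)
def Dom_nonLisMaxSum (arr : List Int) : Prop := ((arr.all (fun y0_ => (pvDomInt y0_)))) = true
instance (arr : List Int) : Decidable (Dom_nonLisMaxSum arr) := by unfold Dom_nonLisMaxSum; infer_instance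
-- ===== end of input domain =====

-- B maintains the tails-value array in place and recovers the LIS sum by one backward
-- scan over pos, instead of A's per-step list rebuild and parent-pointer chain walk.

-- ===== PORT A =====
-- bisect_left: first index whose value is not < x; exact for the sorted lists
-- (dp-values / tails) this algorithm bisects.
def pvBisectLeft (vals : List Int) (x : Int) : Nat :=
  (vals.takeWhile (fun v => v < x)).length

-- one iteration of A's forward loop; state = (parent, dp, pos).
-- All list indices accessed here are in range in Python, so getD is exact.
def pvStepA (arr : List Int) (st : List Int × List Nat × List Nat) (i : Nat) :
    List Int × List Nat × List Nat :=
  let parent := st.1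
  let dp := st.2.1
  let pos := st.2.2
  let idx := pvBisectLeft (dp.map (fun j => arr.getD j 0)) (arr.getD i 0)
  let dp' := if idx < dp.length then dp.set idx i else dp ++ [i]
  let pos' := pos.set i idx
  let parent' := if 0 < idx then parent.set i ((dp'.getD (idx - 1) 0 : Nat) : Int) else parent
  (parent', dp', pos')

-- 'for i in range(n-1,-1,-1): if pos[i]==t: k=i; break' (k stays -1 if no hit)
def pvFindK (pos : List Nat) (n : Nat) (t : Int) : Int :=
  match (List.range n).reverse.find? (fun i => (pos.getD i 0 : Int) = t) with
  | some i => (i : Int)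
  | none => -1

-- 'while k != -1: lis_sum += arr[k]; k = parent[k]'; fuel n+1 only makes the
-- recursion total — the parent chain is strictly decreasing, so it never runs out.
def pvWhileA (arr parent : List Int) : Nat → Int → Int → Int
  | 0, _, acc => acc
  | f + 1, k, acc =>
      if k = -1 then acc
      else pvWhileA arr parent f (parent.getD k.toNat 0) (acc + arr.getD k.toNat 0)

def nonLisMaxSum (arr : List Int) : Int :=
  let n := arr.length
  let st := (List.range n).foldl (pvStepA arr)
      (List.replicate n (-1), ([] : List Nat), List.replicate n 0)
  let k := pvFindK st.2.2 n ((st.2.1.length : Int) - 1)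
  arr.sum - pvWhileA arr st.1 (n + 1) k 0

-- ===== PORT B =====
-- one iteration of B's forward loop; state = (tails, pos)
def pvStepB (st : List Int × List Nat) (x : Int) : List Int × List Nat :=
  let tails := st.1
  let idx := pvBisectLeft tails x
  let tails' := if idx < tails.length then tails.set idx x else tails ++ [x]
  (tails', st.2 ++ [idx])

-- B's backward for-loop over pairs (arr[i], pos[i]), state (target, lis_sum);
-- foldr shape = iteration from the right end.
def pvScanB : List (Int × Nat) → Int → Int × Int
  | [], t => (t, 0)
  | (x, p) :: rest, t =>
      let r := pvScanB rest t
      if (p : Int) = r.1 then (r.1 - 1, r.2 + x) else r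

def nonLisMaxSum_alt (arr : List Int) : Int :=
  let st := arr.foldl pvStepB ([], [])
  arr.sum - (pvScanB (arr.zip st.2) ((st.1.length : Int) - 1)).2

-- ===== PRECONDITION & SPEC =====
def Spec_nonLisMaxSum (arr : List Int) (out : Int) : Prop := out = nonLisMaxSum_alt arr
instance (arr : List Int) (out : Int) : Decidable (Spec_nonLisMaxSum arr out) := by unfold Spec_nonLisMaxSum; infer_instance

-- ===== CLAIM (what is proved, stated in full; the proofs are below) =====
def Claim_equal_nonLisMaxSum : Prop := ∀ (arr : List Int), Dom_nonLisMaxSum arr → Spec_nonLisMaxSum arr (nonLisMaxSum arr)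

-- ===== LEMMAS AND PROOFS =====

-- the two forward-loop states after m iterations
def pvA (arr : List Int) (m : Nat) : List Int × List Nat × List Nat :=
  (List.range m).foldl (pvStepA arr)
    (List.replicate arr.length (-1), ([] : List Nat), List.replicate arr.length 0)

def pvB (arr : List Int) (m : Nat) : List Int × List Nat :=
  (arr.take m).foldl pvStepB ([], [])

-- the coupling invariant between A's state (parent, dp, posA) and B's state (tails, pos)
def pvInvAt (arr : List Int) (m : Nat) (parent : List Int) (dp posA : List Nat)
    (tails : List Int) (pos : List Nat) : Prop :=
  pos.length = m ∧
  posA = pos ++ List.replicate (arr.length - m) 0 ∧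
  parent.length = arr.length ∧
  (∀ i, m ≤ i → i < arr.length → parent.getD i 0 = -1) ∧
  tails = dp.map (fun j => arr.getD j 0) ∧
  dp.length ≤ m ∧
  (∀ t, t < dp.length → dp.getD t 0 < m ∧ pos.getD (dp.getD t 0) 0 = t ∧
      ∀ j, dp.getD t 0 < j → j < m → pos.getD j 0 ≠ t) ∧
  (∀ i, i < m → pos.getD i 0 < dp.length) ∧
  (∀ i, i < m →
      (pos.getD i 0 = 0 → parent.getD i 0 = -1) ∧
      (∀ s, pos.getD i 0 = s + 1 → ∃ j, j < i ∧ pos.getD j 0 = s ∧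
          parent.getD i 0 = (j : Int) ∧ ∀ j', j < j' → j' < i → pos.getD j' 0 ≠ s))

def pvInv (arr : List Int) (m : Nat) : Prop :=
  pvInvAt arr m (pvA arr m).1 (pvA arr m).2.1 (pvA arr m).2.2 (pvB arr m).1 (pvB arr m).2

theorem pvA_succ (arr : List Int) (m : Nat) :
    pvA arr (m + 1) = pvStepA arr (pvA arr m) m := by
  simp [pvA, List.range_succ]

theorem pvB_succ (arr : List Int) (m : Nat) (h : m < arr.length) :
    pvB arr (m + 1) = pvStepB (pvB arr m) (arr.getD m 0) := by
  have h2 : arr.take (m + 1) = arr.take m ++ [arr[m]] := by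
    rw [List.take_add_one, List.getElem?_eq_getElem h]; rfl
  rw [pvB, pvB, h2, List.foldl_append, List.foldl_cons, List.foldl_nil,
    List.getD_eq_getElem arr 0 h]

theorem pvInv_zero (arr : List Int) : pvInv arr 0 := by
  have hA0 : pvA arr 0 = (List.replicate arr.length (-1), [], List.replicate arr.length 0) := rfl
  have hB0 : pvB arr 0 = ([], []) := rfl
  unfold pvInv
  rw [hA0, hB0]
  refine ⟨rfl, by simp, by simp, ?_, rfl, by simp, ?_, ?_, ?_⟩
  · intro i _ hi
    exact List.getD_replicate _ hi
  · intro t ht; simp at ht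
  · intro i hi; omega
  · intro i hi; omega

theorem pvGetD_set_self {α : Type} (l : List α) (i : Nat) (a d : α) (h : i < l.length) :
    (l.set i a).getD i d = a := by
  simp [List.getD_eq_getElem?_getD, h]

theorem pvGetD_set_ne {α : Type} (l : List α) (i j : Nat) (a d : α) (h : i ≠ j) :
    (l.set i a).getD j d = l.getD j d := by
  simp [List.getD_eq_getElem?_getD, h]

theorem pvGetD_snoc_self {α : Type} (l : List α) (x d : α) :
    (l ++ [x]).getD l.length d = x := by
  rw [List.getD_append_right _ _ _ _ (le_refl _)]; simp

theorem pvGetD_snoc_lt {α : Type} (l : List α) (x d : α) (j : Nat) (h : j < l.length) :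
    (l ++ [x]).getD j d = l.getD j d :=
  List.getD_append _ _ _ _ h

theorem pvBisectLeft_le (vals : List Int) (x : Int) : pvBisectLeft vals x ≤ vals.length := by
  unfold pvBisectLeft
  induction vals with
  | nil => simp
  | cons a t ih => by_cases h : a < x <;> simp [List.takeWhile, h] <;> omega

theorem pvStep_inv (arr : List Int) (m : Nat) (hm : m < arr.length)
    (parent : List Int) (dp posA : List Nat) (tails : List Int) (pos : List Nat)
    (h : pvInvAt arr m parent dp posA tails pos) :
    pvInvAt arr (m + 1) (pvStepA arr (parent, dp, posA) m).1
      (pvStepA arr (parent, dp, posA) m).2.1 (pvStepA arr (parent, dp, posA) m).2.2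
      (pvStepB (tails, pos) (arr.getD m 0)).1 (pvStepB (tails, pos) (arr.getD m 0)).2 := by
  obtain ⟨h1, h2, h3, h4, h5, h6, h7, h8, h9⟩ := h
  have hlt : tails.length = dp.length := by rw [h5]; simp
  obtain ⟨idx, hidx⟩ : ∃ k, pvBisectLeft (dp.map (fun j => arr.getD j 0)) (arr.getD m 0) = k :=
    ⟨_, rfl⟩
  have hidxB : pvBisectLeft tails (arr.getD m 0) = idx := by rw [h5]; exact hidx
  have hb : idx ≤ dp.length := by
    rw [← hidx]
    simpa using pvBisectLeft_le (dp.map (fun j => arr.getD j 0)) (arr.getD m 0)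
  have hstepA : pvStepA arr (parent, dp, posA) m =
      ((if 0 < idx then
          parent.set m
            (((if idx < dp.length then dp.set idx m else dp ++ [m]).getD (idx - 1) 0 : Nat) : Int)
        else parent),
       (if idx < dp.length then dp.set idx m else dp ++ [m]),
       posA.set m idx) := by
    simp only [pvStepA, hidx]
  have hstepB : pvStepB (tails, pos) (arr.getD m 0) =
      ((if idx < tails.length then tails.set idx (arr.getD m 0) else tails ++ [arr.getD m 0]),
       pos ++ [idx]) := by
    simp only [pvStepB, hidxB]
  rw [hstepA, hstepB]
  dsimp only
  obtain ⟨dpN, hdpN⟩ : ∃ l, (if idx < dp.length then dp.set idx m else dp ++ [m]) = l := ⟨_, rfl⟩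
  obtain ⟨parN, hparN⟩ : ∃ l,
      (if 0 < idx then parent.set m ((dpN.getD (idx - 1) 0 : Nat) : Int) else parent) = l :=
    ⟨_, rfl⟩
  obtain ⟨tailsN, htailsN⟩ : ∃ l,
      (if idx < tails.length then tails.set idx (arr.getD m 0) else tails ++ [arr.getD m 0]) = l :=
    ⟨_, rfl⟩
  unfold pvInvAt
  rw [hdpN, hparN, htailsN]
  -- facts about the updated lists
  have hdpNcase : (idx < dp.length ∧ dpN.length = dp.length) ∨
      (idx = dp.length ∧ dpN.length = dp.length + 1) := by
    rw [← hdpN]; split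
    · left; exact ⟨by assumption, by simp⟩
    · right; exact ⟨by omega, by simp⟩
  have hidxlt : idx < dpN.length := by rcases hdpNcase with ⟨hc1, hc2⟩ | ⟨hc1, hc2⟩ <;> omega
  have hdpNat : ∀ t, t ≠ idx → t < dp.length → dpN.getD t 0 = dp.getD t 0 := by
    intro t ht htl
    rw [← hdpN]; split
    · exact pvGetD_set_ne dp idx t m 0 (fun e => ht e.symm)
    · exact pvGetD_snoc_lt dp m 0 t htl
  have hdpNidx : dpN.getD idx 0 = m := by
    rw [← hdpN]; split
    · exact pvGetD_set_self dp idx m 0 (by assumption)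
    · have he : idx = dp.length := by omega
      rw [he]; exact pvGetD_snoc_self dp m 0
  have hposNlt : ∀ j, j < m → (pos ++ [idx]).getD j 0 = pos.getD j 0 := by
    intro j hj
    exact pvGetD_snoc_lt pos idx 0 j (by rw [h1]; exact hj)
  have hposNm : (pos ++ [idx]).getD m 0 = idx := by
    conv_lhs => rw [← h1]
    exact pvGetD_snoc_self pos idx 0
  have hparNne : ∀ i, i ≠ m → parN.getD i 0 = parent.getD i 0 := by
    intro i hne
    rw [← hparN]; split
    · exact pvGetD_set_ne parent m i _ 0 (fun e => hne e.symm)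
    · rfl
  refine ⟨by simp [h1], ?_, ?_, ?_, ?_, ?_, ?_, ?_, ?_⟩
  · -- posA.set m idx = (pos ++ [idx]) ++ replicate (n - (m+1)) 0
    have hnm : arr.length - m = (arr.length - (m + 1)) + 1 := by omega
    rw [h2, hnm, List.replicate_succ, List.set_append, if_neg (by simp [h1])]
    simp [h1]
  · -- parent length unchanged
    rw [← hparN]; split <;> simp [h3]
  · -- untouched parent entries stay -1
    intro i hi hi2
    rw [hparNne i (by omega)]
    exact h4 i (by omega) hi2
  · -- tailsN = dpN.map (value)
    rw [← htailsN, ← hdpN, hlt]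
    by_cases hc : idx < dp.length
    · rw [if_pos hc, if_pos hc, List.map_set, ← h5]
    · rw [if_neg hc, if_neg hc, List.map_append, ← h5]; rfl
  · -- dpN.length ≤ m + 1
    rcases hdpNcase with ⟨_, hc⟩ | ⟨_, hc2⟩ <;> omega
  · -- clause (7): dpN entries are last occurrences at their level
    intro t ht
    by_cases hti : t = idx
    · rw [hti, hdpNidx, hposNm]
      exact ⟨by omega, rfl, fun j hj1 hj2 => by omega⟩
    · have htl : t < dp.length := by
        rcases hdpNcase with hc | ⟨hc1, hc2⟩ <;> omega
      rw [hdpNat t hti htl]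
      obtain ⟨ha, hb2, hc⟩ := h7 t htl
      refine ⟨by omega, by rw [hposNlt _ ha]; exact hb2, ?_⟩
      intro j hj1 hj2
      by_cases hjm : j = m
      · rw [hjm, hposNm]; exact fun e => hti e.symm
      · rw [hposNlt j (by omega)]; exact hc j hj1 (by omega)
  · -- clause (8): pos values below dpN.length
    intro i hi
    by_cases him : i = m
    · rw [him, hposNm]; exact hidxlt
    · rw [hposNlt i (by omega)]
      have := h8 i (by omega)
      rcases hdpNcase with ⟨_, hc⟩ | ⟨_, hc2⟩ <;> omega
  · -- clause (9): parent characterisation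
    intro i hi
    by_cases him : i = m
    · rw [him]
      constructor
      · intro h0
        rw [hposNm] at h0
        rw [← hparN, if_neg (by omega)]
        exact h4 m (le_refl m) hm
      · intro s hs
        rw [hposNm] at hs
        have hpos0 : 0 < idx := by omega
        have hsd : s < dp.length := by omega
        obtain ⟨ha, hb2, hc⟩ := h7 s hsd
        have hval : dpN.getD (idx - 1) 0 = dp.getD s 0 := by
          have e : idx - 1 = s := by omega
          rw [e]; exact hdpNat s (by omega) hsd
        refine ⟨dp.getD s 0, by omega, by rw [hposNlt _ ha]; exact hb2, ?_, ?_⟩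
        · rw [← hparN, if_pos hpos0,
            pvGetD_set_self parent m _ 0 (by rw [h3]; exact hm), hval]
        · intro j' hj1 hj2
          rw [hposNlt j' hj2]; exact hc j' hj1 hj2
    · have hi' : i < m := by omega
      constructor
      · intro h0
        rw [hposNlt i hi'] at h0
        rw [hparNne i him]
        exact (h9 i hi').1 h0
      · intro s hs
        rw [hposNlt i hi'] at hs
        obtain ⟨j, hj1, hj2, hj3, hj4⟩ := (h9 i hi').2 s hs
        refine ⟨j, hj1, by rw [hposNlt j (by omega)]; exact hj2, ?_, ?_⟩
        · rw [hparNne i him]; exact hj3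
        · intro j' hja hjb
          rw [hposNlt j' (by omega)]; exact hj4 j' hja hjb

theorem pvInv_step (arr : List Int) (m : Nat) (hm : m < arr.length) (h : pvInv arr m) :
    pvInv arr (m + 1) := by
  have := pvStep_inv arr m hm (pvA arr m).1 (pvA arr m).2.1 (pvA arr m).2.2
    (pvB arr m).1 (pvB arr m).2 h
  unfold pvInv
  rw [pvA_succ, pvB_succ arr m hm]
  exact this

theorem pvInv_all (arr : List Int) (m : Nat) (hm : m ≤ arr.length) : pvInv arr m := by
  induction m with
  | zero => exact pvInv_zero arr
  | succ k ih => exact pvInv_step arr k (by omega) (ih (by omega))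

-- ===== phase 2: the parent-chain walk equals the backward scan =====

theorem pvScanB_snoc (l : List (Int × Nat)) (x : Int) (p : Nat) (t : Int) :
    pvScanB (l ++ [(x, p)]) t =
      if (p : Int) = t then ((pvScanB l (t - 1)).1, (pvScanB l (t - 1)).2 + x)
      else pvScanB l t := by
  induction l generalizing t with
  | nil => simp [pvScanB]
  | cons hd tl ih =>
      obtain ⟨y, q⟩ := hd
      simp only [List.cons_append, pvScanB, ih]
      by_cases hp : (p : Int) = t
      · simp only [if_pos hp]
        by_cases hq : (q : Int) = (pvScanB tl (t - 1)).1
        · simp only [if_pos hq, Prod.mk.injEq]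
          exact ⟨by trivial, by ring⟩
        · simp only [if_neg hq]
      · simp only [if_neg hp]

theorem pvZipTake_succ (arr : List Int) (pos : List Nat) (m : Nat)
    (h1 : m < arr.length) (h2 : m < pos.length) :
    (arr.zip pos).take (m + 1) =
      (arr.zip pos).take m ++ [(arr.getD m 0, pos.getD m 0)] := by
  have hz : m < (arr.zip pos).length := by
    rw [List.length_zip]; omega
  rw [List.take_add_one, List.getElem?_eq_getElem hz,
    List.getD_eq_getElem arr 0 h1, List.getD_eq_getElem pos 0 h2]
  simp [List.getElem_zip]

theorem pvScan_none (arr : List Int) (pos : List Nat) (t : Int) :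
    ∀ m, m ≤ arr.length → m ≤ pos.length →
    (∀ j, j < m → ((pos.getD j 0 : Nat) : Int) ≠ t) →
    pvScanB ((arr.zip pos).take m) t = (t, 0) := by
  intro m
  induction m with
  | zero => intro _ _ _; simp [pvScanB]
  | succ m ih =>
      intro hm1 hm2 hnone
      rw [pvZipTake_succ arr pos m (by omega) (by omega), pvScanB_snoc,
        if_neg (hnone m (by omega))]
      exact ih (by omega) (by omega) (fun j hj => hnone j (by omega))

theorem pvScan_skip (arr : List Int) (pos : List Nat) (t : Int) (m' : Nat) :
    ∀ m, m' ≤ m → m ≤ arr.length → m ≤ pos.length →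
    (∀ j, m' ≤ j → j < m → ((pos.getD j 0 : Nat) : Int) ≠ t) →
    pvScanB ((arr.zip pos).take m) t = pvScanB ((arr.zip pos).take m') t := by
  intro m
  induction m with
  | zero =>
      intro h _ _ _
      have : m' = 0 := by omega
      rw [this]
  | succ m ih =>
      intro hm hl1 hl2 hno
      by_cases he : m' = m + 1
      · rw [he]
      · rw [pvZipTake_succ arr pos m (by omega) (by omega), pvScanB_snoc,
          if_neg (hno m (by omega) (by omega))]
        exact ih (by omega) (by omega) (by omega) (fun j hj1 hj2 => hno j hj1 (by omega))

theorem pvWhileA_neg (arr parent : List Int) (f : Nat) (acc : Int) :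
    pvWhileA arr parent f (-1) acc = acc := by
  cases f <;> simp [pvWhileA]

theorem pvWhileA_nat (arr parent : List Int) (f : Nat) (k : Nat) (acc : Int) :
    pvWhileA arr parent (f + 1) (k : Int) acc
      = pvWhileA arr parent f (parent.getD k 0) (acc + arr.getD k 0) := by
  have h : pvWhileA arr parent (f + 1) (k : Int) acc =
      if (k : Int) = -1 then acc
      else pvWhileA arr parent f (parent.getD (k : Int).toNat 0)
        (acc + arr.getD (k : Int).toNat 0) := rfl
  rw [h, if_neg (by omega)]
  simp

theorem pvWhile_scan (arr parent : List Int) (pos : List Nat)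
    (Hchar : ∀ i, i < arr.length →
      (pos.getD i 0 = 0 → parent.getD i 0 = -1) ∧
      (∀ s, pos.getD i 0 = s + 1 → ∃ j, j < i ∧ pos.getD j 0 = s ∧
        parent.getD i 0 = (j : Int) ∧ ∀ j', j < j' → j' < i → pos.getD j' 0 ≠ s))
    (hlen : pos.length = arr.length) :
    ∀ t k f acc, k < arr.length → pos.getD k 0 = t → t ≤ f →
      pvWhileA arr parent (f + 1) (k : Int) acc
        = acc + (pvScanB ((arr.zip pos).take (k + 1)) ((t : Nat) : Int)).2 := by
  intro t
  induction t with
  | zero =>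
      intro k f acc hk ht _
      rw [pvWhileA_nat, (Hchar k hk).1 ht, pvWhileA_neg]
      rw [pvZipTake_succ arr pos k hk (by omega), pvScanB_snoc, ht]
      rw [if_pos rfl]
      rw [pvScan_none arr pos ((0 : Nat) - 1 : Int) k (by omega) (by omega)
        (fun j hj => by omega)]
      simp only
      omega
  | succ s ih =>
      intro k f acc hk ht hf
      obtain ⟨j, hj1, hj2, hj3, hj4⟩ := (Hchar k hk).2 s ht
      obtain ⟨f', rfl⟩ : ∃ f', f = f' + 1 := ⟨f - 1, by omega⟩
      rw [pvWhileA_nat, hj3, ih j f' (acc + arr.getD k 0) (by omega) hj2 (by omega)]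
      rw [pvZipTake_succ arr pos k hk (by omega), pvScanB_snoc, ht]
      rw [if_pos rfl]
      have hcast : ((s + 1 : Nat) : Int) - 1 = ((s : Nat) : Int) := by push_cast; ring
      rw [hcast]
      rw [pvScan_skip arr pos ((s : Nat) : Int) (j + 1) k (by omega) (by omega) (by omega)
        (fun j' hja hjb => by
          intro e
          exact hj4 j' (by omega) hjb (by omega))]
      simp only
      omega

theorem pvFind_rev (p : Nat → Bool) :
    ∀ n j, j < n → p j = true → (∀ i, j < i → i < n → p i = false) →
    (List.range n).reverse.find? p = some j := by
  intro n
  induction n with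
  | zero => intro j hj _ _; omega
  | succ n ih =>
      intro j hj hp hmax
      rw [List.range_succ, List.reverse_append]
      by_cases hjn : j = n
      · subst hjn
        simp [hp]
      · have hn : p n = false := hmax n (by omega) (by omega)
        simp only [List.reverse_singleton, List.singleton_append, List.find?_cons, hn]
        exact ih j (by omega) hp (fun i h1 h2 => hmax i h1 (by omega))

theorem pvMain (arr : List Int) : nonLisMaxSum arr = nonLisMaxSum_alt arr := by
  rcases Nat.eq_zero_or_pos arr.length with hn | hn
  · have he : arr = [] := List.length_eq_zero_iff.mp hn
    subst he; rfl
  · have hinv := pvInv_all arr arr.length (le_refl _)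
    unfold pvInv pvInvAt at hinv
    obtain ⟨h1, h2, h3, h4, h5, h6, h7, h8, h9⟩ := hinv
    have hposA : (pvA arr arr.length).2.2 = (pvB arr arr.length).2 := by
      rw [h2]; simp
    have hL1 : 1 ≤ (pvA arr arr.length).2.1.length := by
      have := h8 0 hn; omega
    obtain ⟨hj1, hj2, hj3⟩ := h7 ((pvA arr arr.length).2.1.length - 1) (by omega)
    have hfind : pvFindK (pvB arr arr.length).2 arr.length
        (((pvA arr arr.length).2.1.length : Int) - 1)
        = ((pvA arr arr.length).2.1.getD ((pvA arr arr.length).2.1.length - 1) 0 : Int) := by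
      unfold pvFindK
      rw [pvFind_rev _ arr.length ((pvA arr arr.length).2.1.getD ((pvA arr arr.length).2.1.length - 1) 0)
        hj1 (by
          simp only [decide_eq_true_eq]
          rw [hj2]
          omega)
        (fun i hi1 hi2 => by
          simp only [decide_eq_false_iff_not]
          intro e
          exact hj3 i hi1 hi2 (by omega))]
    have hA : nonLisMaxSum arr = arr.sum -
        pvWhileA arr (pvA arr arr.length).1 (arr.length + 1)
          (pvFindK (pvA arr arr.length).2.2 arr.length
            (((pvA arr arr.length).2.1.length : Int) - 1)) 0 := rfl
    have hBfold : arr.foldl pvStepB ([], []) = pvB arr arr.length := by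
      rw [pvB, List.take_length]
    have hB : nonLisMaxSum_alt arr = arr.sum -
        (pvScanB (arr.zip (pvB arr arr.length).2)
          (((pvB arr arr.length).1.length : Int) - 1)).2 := by
      unfold nonLisMaxSum_alt
      rw [hBfold]
    have htl : (pvB arr arr.length).1.length = (pvA arr arr.length).2.1.length := by
      rw [h5]; simp
    have hcastL : ((pvA arr arr.length).2.1.length : Int) - 1
        = (((pvA arr arr.length).2.1.length - 1 : Nat) : Int) := by omega
    have hscan := pvWhile_scan arr (pvA arr arr.length).1 (pvB arr arr.length).2 h9 h1
      ((pvA arr arr.length).2.1.length - 1)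
      ((pvA arr arr.length).2.1.getD ((pvA arr arr.length).2.1.length - 1) 0)
      arr.length 0 hj1 hj2 (by omega)
    have hfull : (arr.zip (pvB arr arr.length).2).take arr.length
        = arr.zip (pvB arr arr.length).2 := by
      apply List.take_of_length_le
      rw [List.length_zip]; omega
    have hskip : pvScanB ((arr.zip (pvB arr arr.length).2).take arr.length)
          (((pvA arr arr.length).2.1.length - 1 : Nat) : Int)
        = pvScanB ((arr.zip (pvB arr arr.length).2).take
            ((pvA arr arr.length).2.1.getD ((pvA arr arr.length).2.1.length - 1) 0 + 1))
          (((pvA arr arr.length).2.1.length - 1 : Nat) : Int) :=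
      pvScan_skip arr (pvB arr arr.length).2
        (((pvA arr arr.length).2.1.length - 1 : Nat) : Int)
        ((pvA arr arr.length).2.1.getD ((pvA arr arr.length).2.1.length - 1) 0 + 1)
        arr.length (by omega) (le_refl _) (by omega)
        (fun j' hja hjb => by
          intro e
          exact hj3 j' (by omega) hjb (by omega))
    have hr : (pvScanB (arr.zip (pvB arr arr.length).2)
          (((pvA arr arr.length).2.1.length : Int) - 1)).2
        = (pvScanB ((arr.zip (pvB arr arr.length).2).take
            ((pvA arr arr.length).2.1.getD ((pvA arr arr.length).2.1.length - 1) 0 + 1))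
          (((pvA arr arr.length).2.1.length - 1 : Nat) : Int)).2 := by
      conv_lhs => rw [hcastL, ← hfull]
      rw [hskip]
    rw [hA, hposA, hfind, hB, htl, hscan, hr]
    omega

-- ===== VERDICT (by name: the statement is the Claim_ definition above) =====
theorem nonLisMaxSum_spec : Claim_equal_nonLisMaxSum := by
  intro arr _
  exact pvMain arr
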